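-- pv_equiv track=rewrite | github.com/dirkweissenborn/jack | projects/assertion_mr/assertions/extract_conceptnet.py | normalize_and_sois
-- ===== SOURCE A (Python) =====
-- def normalize_and_sois(s):
--     i = s.find("[[")
--     offset = 0
--     sois = list()
--     while i >= 0:
--         start = i - offset
--         offset += 2
--         sois.append((start, s.find("]]", i) - offset))
--         offset += 2
--         i = s.find("[[", i + 1)
--     s_norm = s.replace("[[", "").replace("]]", "").lower()
--     return s_norm, sois
-- ===== SOURCE B (Python) =====
-- def _pair_positions(s, a, b):
--     return [i for i in range(len(s) - 1) if s[i] == a and s[i + 1] == b]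
--
--
-- def normalize_and_sois(s):
--     opens = _pair_positions(s, '[', '[')
--     closes = _pair_positions(s, ']', ']')
--     sois = []
--     for k, p in enumerate(opens):
--         e = next((c for c in closes if c >= p), -1)
--         sois.append((p - 4 * k, e - 4 * k - 2))
--     s_norm = s.replace("[[", "").replace("]]", "").lower()
--     return s_norm, sois
-- ===== Notes on version B (the rewrite author's own statement) =====
-- stated objective: alternative
-- what changed: Replaces A's single stateful while-loop (repeated find calls threading a mutable offset and appending spans as it scans) by two declarative passes: one character scan collects all open-marker and close-marker pair positions up front, then each span is computed from the k-th open position with the closed-form offset 4*k and the first close position at or after it.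
import Mathlib
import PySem

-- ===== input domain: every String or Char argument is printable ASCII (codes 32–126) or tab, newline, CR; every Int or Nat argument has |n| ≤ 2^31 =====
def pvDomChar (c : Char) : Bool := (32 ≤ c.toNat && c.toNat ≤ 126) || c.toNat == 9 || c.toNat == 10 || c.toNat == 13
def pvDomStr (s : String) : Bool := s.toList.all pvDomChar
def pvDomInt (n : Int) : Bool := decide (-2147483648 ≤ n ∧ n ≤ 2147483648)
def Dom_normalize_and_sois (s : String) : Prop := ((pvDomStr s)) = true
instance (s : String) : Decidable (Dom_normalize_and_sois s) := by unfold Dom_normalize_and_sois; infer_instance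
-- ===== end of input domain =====

-- B replaces A's stateful find/offset while-loop by a position-list scan with closed-form offsets 4*k (alternative decomposition, same cost class).


-- ===== PORT A =====
-- the while-loop: state (i, offset, sois); fuel only makes the recursion structural
-- (it is never exhausted: each iteration moves i forward, started with fuel = len(s)+1)
def nasLoopA (s : String) : Nat → Int → Int → List (Int × Int) → List (Int × Int)
  | 0, _, _, sois => sois
  | fuel + 1, i, offset, sois =>
    if 0 ≤ i then
      let start := i - offset
      let offset1 := offset + 2
      let sois1 := sois ++ [(start, PySem.Str.findFrom s "]]" i none - offset1)]
      let offset2 := offset1 + 2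
      nasLoopA s fuel (PySem.Str.findFrom s "[[" (i + 1) none) offset2 sois1
    else sois

def normalize_and_sois (s : String) : String × (List (Int × Int)) :=
  let i := PySem.Str.find s "[["
  let sois := nasLoopA s (s.toList.length + 1) i 0 []
  let s_norm := PySem.Str.lower (PySem.Str.replace (PySem.Str.replace s "[[" "") "]]" "")
  (s_norm, sois)

-- ===== PORT B =====
-- helper _pair_positions(s, a, b): positions i with s[i] == a and s[i+1] == b
def nasPairPositions (s : String) (a b : Char) : List Int :=
  (PySem.List.pyRange 0 (PySem.Str.len s - 1) 1).filter
    (fun i => PySem.Str.pyGet? s i == some a && PySem.Str.pyGet? s (i + 1) == some b)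

def normalize_and_sois_alt (s : String) : String × (List (Int × Int)) :=
  let opens := nasPairPositions s '[' '['
  let closes := nasPairPositions s ']' ']'
  let sois := (PySem.List.enumerate opens 0).foldl
    (fun sois kp =>
      let e := match closes.find? (fun c => kp.2 ≤ c) with
        | some c => c
        | none => -1
      sois ++ [(kp.2 - 4 * kp.1, e - 4 * kp.1 - 2)]) []
  let s_norm := PySem.Str.lower (PySem.Str.replace (PySem.Str.replace s "[[" "") "]]" "")
  (s_norm, sois)

-- ===== PRECONDITION & SPEC =====
def Spec_normalize_and_sois (s : String) (out : String × (List (Int × Int))) : Prop := out = normalize_and_sois_alt s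
instance (s : String) (out : String × (List (Int × Int))) : Decidable (Spec_normalize_and_sois s out) := by unfold Spec_normalize_and_sois; infer_instance

-- ===== CLAIM (what is proved, stated in full; the proofs are below) =====
def Claim_equal_normalize_and_sois : Prop := ∀ (s : String), Dom_normalize_and_sois s → Spec_normalize_and_sois s (normalize_and_sois s)

-- ===== LEMMAS AND PROOFS =====

-- [a, b] is a prefix of l iff l starts with a then b
theorem nas_prefix2_iff (a b : Char) (l : List Char) :
    [a, b] <+: l ↔ l[0]? = some a ∧ l[1]? = some b := by
  constructor
  · rintro ⟨t, rfl⟩; simp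
  · rintro ⟨h0, h1⟩
    match l with
    | [] => simp at h0
    | [x] => simp at h1
    | x :: y :: t =>
      simp_all only [List.getElem?_cons_zero, Option.some.injEq, List.getElem?_cons_succ]
      exact ⟨t, by simp⟩

-- membership in the position list = the 2-char pattern occurs there
theorem nas_mem_pairPositions (s : String) (a b : Char) (p : Int) :
    p ∈ nasPairPositions s a b ↔ 0 ≤ p ∧ [a, b] <+: s.toList.drop p.toNat := by
  unfold nasPairPositions
  simp only [List.mem_filter, PySem.List.mem_pyRange_one, PySem.Str.pyGet?_eq,
    PySem.Str.len_eq, Bool.and_eq_true, beq_iff_eq]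
  constructor
  · rintro ⟨⟨h0, _⟩, hga, hgb⟩
    refine ⟨h0, (nas_prefix2_iff a b _).mpr ?_⟩
    have hpa : PySem.Chars.pyGet? s.toList p = s.toList[p.toNat]? := by
      rw [show p = ((p.toNat : Nat) : Int) from (Int.toNat_of_nonneg h0).symm]
      exact PySem.List.pyGet?_natCast s.toList p.toNat
    have hpb : PySem.Chars.pyGet? s.toList (p + 1) = s.toList[p.toNat + 1]? := by
      rw [show p + 1 = ((p.toNat + 1 : Nat) : Int) by omega]
      exact PySem.List.pyGet?_natCast s.toList (p.toNat + 1)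
    rw [hpa] at hga; rw [hpb] at hgb
    constructor
    · rw [List.getElem?_drop]; simpa using hga
    · rw [List.getElem?_drop]; simpa [Nat.add_comm] using hgb
  · rintro ⟨h0, hpre⟩
    obtain ⟨hga, hgb⟩ := (nas_prefix2_iff a b _).mp hpre
    rw [List.getElem?_drop] at hga hgb
    simp only [Nat.add_zero] at hga
    have hlt : p.toNat + 1 < s.toList.length := (List.getElem?_eq_some_iff.mp hgb).1
    have hpa : PySem.Chars.pyGet? s.toList p = s.toList[p.toNat]? := by
      rw [show p = ((p.toNat : Nat) : Int) from (Int.toNat_of_nonneg h0).symm]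
      exact PySem.List.pyGet?_natCast s.toList p.toNat
    have hpb : PySem.Chars.pyGet? s.toList (p + 1) = s.toList[p.toNat + 1]? := by
      rw [show p + 1 = ((p.toNat + 1 : Nat) : Int) by omega]
      exact PySem.List.pyGet?_natCast s.toList (p.toNat + 1)
    exact ⟨⟨h0, by omega⟩, by rw [hpa]; exact hga, by rw [hpb]; exact hgb⟩

theorem nas_pairPositions_sorted (s : String) (a b : Char) :
    (nasPairPositions s a b).Pairwise (· < ·) :=
  (PySem.List.pairwise_lt_pyRange_one 0 (PySem.Str.len s - 1)).filter _

-- a position is in [0, len-1) hence strictly below the length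
theorem nas_pos_bounds (s : String) (a b : Char) (p : Int) (hp : p ∈ nasPairPositions s a b) :
    0 ≤ p ∧ p + 1 < (s.toList.length : Int) := by
  obtain ⟨h0, hpre⟩ := (nas_mem_pairPositions s a b p).mp hp
  have hlen := hpre.length_le
  simp only [List.length_cons, List.length_nil, List.length_drop] at hlen
  omega

-- first element of the position list that is ≥ t, as find? over the sorted list
theorem nas_find?_split (L : List Int) (done rest : List Int) (t : Int)
    (hsplit : L = done ++ rest) (hdone : ∀ x ∈ done, x < t) (hrest : ∀ x ∈ rest, t ≤ x) :
    L.find? (fun c => t ≤ c) = rest.head? := by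
  subst hsplit
  rw [List.find?_append]
  have h1 : done.find? (fun c => t ≤ c) = none := by
    rw [List.find?_eq_none]; intro x hx; simpa using not_le.mpr (hdone x hx)
  rw [h1, Option.none_or]
  cases rest with
  | nil => rfl
  | cons p r => simp [decide_eq_true (hrest p (by simp))]

-- findFrom = the first pattern position ≥ t (or -1): the bridge between A's scan and B's list
theorem nas_findFrom_eq (s : String) (a b : Char) (t : Int) (h0 : 0 ≤ t)
    (hlen : t ≤ (s.toList.length : Int)) :
    PySem.Chars.findFrom s.toList [a, b] t none =
      (match (nasPairPositions s a b).find? (fun c => t ≤ c) with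
        | some c => c
        | none => -1) := by
  have htt : t = ((t.toNat : Nat) : Int) := (Int.toNat_of_nonneg h0).symm
  have htn : t.toNat ≤ s.toList.length := by omega
  cases hf : (nasPairPositions s a b).find? (fun c => t ≤ c) with
  | none =>
    have hnone := List.find?_eq_none.mp hf
    rw [htt]
    rw [PySem.Chars.findFrom_natCast_eq_neg_one_iff s.toList [a, b] t.toNat htn]
    intro hinf
    obtain ⟨j, hj⟩ := (PySem.Chars.exists_prefix_drop_iff_isIn [a, b] (s.toList.drop t.toNat)).mpr
      ((PySem.Chars.isIn_iff_infix _ _).mpr hinf)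
    rw [List.drop_drop] at hj
    have hq : ((j + t.toNat : Nat) : Int) ∈ nasPairPositions s a b := by
      rw [nas_mem_pairPositions]
      refine ⟨Int.natCast_nonneg _, ?_⟩
      rw [Int.toNat_natCast, show j + t.toNat = t.toNat + j by omega]
      exact hj
    have := hnone _ hq
    simp only [decide_eq_true_eq] at this
    omega
  | some c =>
    have hc_mem : c ∈ nasPairPositions s a b := List.mem_of_find?_eq_some hf
    have htc : t ≤ c := by simpa using List.find?_some hf
    obtain ⟨hc0, hcpre⟩ := (nas_mem_pairPositions s a b c).mp hc_mem
    -- c is minimal among positions ≥ t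
    have hmin : ∀ x ∈ nasPairPositions s a b, t ≤ x → c ≤ x := by
      obtain ⟨as, bs, hsplit, hfail⟩ := List.find?_eq_some_iff_append.mp hf |>.2
      intro x hx htx
      rw [hsplit] at hx
      rcases List.mem_append.mp hx with hin | hin
      · exact absurd htx (by simpa using hfail x hin)
      · rcases List.mem_cons.mp hin with rfl | hin
        · exact le_refl _
        · have hp := nas_pairPositions_sorted s a b
          rw [hsplit] at hp
          have := (List.pairwise_append.mp hp).2.1
          exact le_of_lt ((List.pairwise_cons.mp this).1 x hin)
    -- findFrom is not -1: the pattern occurs in the drop at offset c - t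
    have hne : PySem.Chars.findFrom s.toList [a, b] ((t.toNat : Nat) : Int) none ≠ -1 := by
      rw [Ne, PySem.Chars.findFrom_natCast_eq_neg_one_iff s.toList [a, b] t.toNat htn]
      intro hno
      apply hno
      apply (PySem.Chars.isIn_iff_infix _ _).mp
      apply (PySem.Chars.exists_prefix_drop_iff_isIn [a, b] _).mp
      exact ⟨c.toNat - t.toNat, by rw [List.drop_drop]; rw [show t.toNat + (c.toNat - t.toNat) = c.toNat by omega]; exact hcpre⟩
    obtain ⟨hge, hpre, hminF⟩ := PySem.Chars.findFrom_natCast_spec s.toList [a, b] t.toNat htn hne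
    set r := PySem.Chars.findFrom s.toList [a, b] ((t.toNat : Nat) : Int) none with hr
    have hr0 : 0 ≤ r := le_trans (by omega) hge
    have hr_mem : r ∈ nasPairPositions s a b := by
      rw [nas_mem_pairPositions]; exact ⟨hr0, hpre⟩
    have hrt : t ≤ r := le_trans (by omega) hge
    have hcr : c ≤ r := hmin r hr_mem hrt
    have hrc : ¬ c < r := by
      intro hlt
      exact hminF c.toNat (by omega) (by omega) hcpre
    rw [htt]
    show r = c
    omega

-- the loop, related to the position list split done ++ rest
theorem nas_loop_eq (s : String) (done rest : List Int) (t : Int) (acc : List (Int × Int))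
    (fuel : Nat)
    (hsplit : nasPairPositions s '[' '[' = done ++ rest)
    (ht0 : 0 ≤ t) (htlen : t ≤ (s.toList.length : Int))
    (hdone : ∀ x ∈ done, x < t) (hrest : ∀ x ∈ rest, t ≤ x)
    (hfuel : rest.length ≤ fuel) :
    nasLoopA s fuel (PySem.Str.findFrom s "[[" t none) (4 * (done.length : Int)) acc =
      acc ++ (PySem.List.enumerate rest (done.length : Int)).map
        (fun kp =>
          (kp.2 - 4 * kp.1,
            (match (nasPairPositions s ']' ']').find? (fun c => kp.2 ≤ c) with
              | some c => c
              | none => -1) - 4 * kp.1 - 2)) := by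
  induction rest generalizing done t acc fuel with
  | nil =>
    have hfind : PySem.Str.findFrom s "[[" t none = -1 := by
      rw [PySem.Str.findFrom_eq, show ("[[" : String).toList = ['[', '['] from rfl,
        nas_findFrom_eq s '[' '[' t ht0 htlen,
        nas_find?_split _ done [] t hsplit hdone (by simp)]
      rfl
    rw [hfind]
    cases fuel with
    | zero => simp [nasLoopA, PySem.List.enumerate]
    | succ f => simp [nasLoopA, PySem.List.enumerate]
  | cons p rest' ih =>
    have hfind : PySem.Str.findFrom s "[[" t none = p := by
      rw [PySem.Str.findFrom_eq, show ("[[" : String).toList = ['[', '['] from rfl,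
        nas_findFrom_eq s '[' '[' t ht0 htlen,
        nas_find?_split _ done (p :: rest') t hsplit hdone hrest]
      rfl
    obtain ⟨hp0, hplen⟩ := nas_pos_bounds s '[' '[' p (by rw [hsplit]; simp)
    cases fuel with
    | zero => simp at hfuel
    | succ f =>
      rw [hfind]
      show (if 0 ≤ p then _ else _) = _
      rw [if_pos hp0]
      have hsplit' : nasPairPositions s '[' '[' = (done ++ [p]) ++ rest' := by
        rw [hsplit]; simp
      have hsorted := nas_pairPositions_sorted s '[' '['
      rw [hsplit] at hsorted
      have hrest' : ∀ x ∈ rest', p + 1 ≤ x := by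
        intro x hx
        have := (List.pairwise_cons.mp (List.pairwise_append.mp hsorted).2.1).1 x hx
        omega
      have htp : t ≤ p := hrest p (by simp)
      have := ih (done ++ [p]) (p + 1)
        (acc ++ [(p - 4 * (done.length : Int),
          PySem.Str.findFrom s "]]" p none - (4 * (done.length : Int) + 2))])
        f hsplit' (by omega) (by omega)
        (by intro x hx; rcases List.mem_append.mp hx with h | h
            · have := hdone x h; omega
            · simp at h; omega)
        hrest' (by simpa using hfuel)
      simp only [List.length_append, List.length_cons, List.length_nil] at this
      rw [show ((done.length + (0 + 1) : Nat) : Int) = (done.length : Int) + 1 by push_cast; ring] at this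
      show nasLoopA s f (PySem.Str.findFrom s "[[" (p + 1) none)
          (4 * (done.length : Int) + 2 + 2)
          (acc ++ [(p - 4 * (done.length : Int),
            PySem.Str.findFrom s "]]" p none - (4 * (done.length : Int) + 2))]) = _
      rw [show 4 * (done.length : Int) + 2 + 2 = 4 * ((done.length : Int) + 1) by ring]
      rw [this]
      have hclose : PySem.Str.findFrom s "]]" p none =
          (match (nasPairPositions s ']' ']').find? (fun c => p ≤ c) with
            | some c => c
            | none => -1) := by
        rw [PySem.Str.findFrom_eq, show ("]]" : String).toList = [']', ']'] from rfl]
        exact nas_findFrom_eq s ']' ']' p hp0 (by omega)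
      rw [PySem.List.enumerate_cons]
      simp only [List.map_cons]
      rw [List.append_assoc]
      congr 2
      · simp only [List.cons_append, List.nil_append, List.cons.injEq, and_true]
        rw [hclose]
        exact Prod.ext rfl (by ring)

-- ===== VERDICT (by name: the statement is the Claim_ definition above) =====
theorem normalize_and_sois_spec : Claim_equal_normalize_and_sois := by
  intro s _
  unfold Spec_normalize_and_sois normalize_and_sois normalize_and_sois_alt
  simp only [PySem.List.foldl_append_singleton_eq_map, List.nil_append]
  refine Prod.ext rfl ?_
  have hfind0 : PySem.Str.find s "[[" = PySem.Str.findFrom s "[[" 0 none := by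
    rw [PySem.Str.findFrom_eq, PySem.Chars.findFrom_zero, PySem.Str.find_eq]
  have hlenpos : (nasPairPositions s '[' '[').length ≤ s.toList.length + 1 := by
    have h1 := List.length_filter_le
      (fun i => PySem.Str.pyGet? s i == some '[' && PySem.Str.pyGet? s (i + 1) == some '[')
      (PySem.List.pyRange 0 (PySem.Str.len s - 1) 1)
    have h2 := PySem.List.length_pyRange_one 0 (PySem.Str.len s - 1)
    rw [PySem.Str.len_eq] at h2
    unfold nasPairPositions
    rw [PySem.Str.len_eq]
    rw [PySem.Str.len_eq] at h1
    omega
  have := nas_loop_eq s [] (nasPairPositions s '[' '[') 0 [] (s.toList.length + 1)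
    (by simp) (le_refl 0) (by positivity) (by simp)
    (by intro x hx; exact (nas_pos_bounds s '[' '[' x hx).1) hlenpos
  simp only [List.length_nil, Nat.cast_zero, mul_zero, List.nil_append] at this
  rw [hfind0, this]
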